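-- pv_equiv track=rewrite | github.com/guichristmann/adventofcode2019 | 4/4_1.py | meetCriteria
-- ===== SOURCE A (Python) =====
-- def sign(x):
--     if x < 0:
--         return -1
--     elif x > 0:
--         return 1
--     else:
--         return 0
--
-- def meetCriteria(n):
--     str_n = str(n)
--
--     adj_cond = False
--     isMonotonic = True
--     for c, c_n in zip(str_n, str_n[1:]):
--         # Check if sequence is monotonic
--         if sign(int(c_n) - int(c)) == -1:
--             isMonotonic = False
--             break
--
--         # Checking if two adjacent digits are the same
--         if c == c_n:
--             adj_cond = True
--
--     if adj_cond and isMonotonic: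
--         return True
--     else:
--         return False
-- ===== SOURCE B (Python) =====
-- def meetCriteria(n):
--     digits = [int(c) for c in str(n)]
--     return digits == sorted(digits) and len(set(digits)) < len(digits)
-- ===== Notes on version B (the rewrite author's own statement) =====
-- stated objective: simpler
-- what changed: Replaced the manual zip-scan with break flags by building the digit list once and testing monotonicity via digits == sorted(digits) and the adjacent-equal condition via a set-based duplicate test (for a non-decreasing list a duplicate is exactly an adjacent equal pair).
import Mathlib
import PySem

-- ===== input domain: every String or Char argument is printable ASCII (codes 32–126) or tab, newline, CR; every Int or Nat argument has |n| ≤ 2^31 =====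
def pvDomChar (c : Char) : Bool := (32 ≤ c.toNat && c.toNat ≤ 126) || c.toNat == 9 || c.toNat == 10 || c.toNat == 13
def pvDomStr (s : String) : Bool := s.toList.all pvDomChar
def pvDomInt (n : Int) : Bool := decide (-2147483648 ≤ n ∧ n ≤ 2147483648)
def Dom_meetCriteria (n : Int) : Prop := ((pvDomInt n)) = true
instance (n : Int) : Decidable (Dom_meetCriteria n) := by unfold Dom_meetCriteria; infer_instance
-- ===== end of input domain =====

-- B replaces A's zip-scan with break flags by 'digits == sorted(digits) and len(set(digits)) < len(digits)' (objective: simpler).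

-- ===== PORT A =====
-- int(c) on a one-character string; under Pre_ (0 ≤ n) every c is a digit of str(n), so ofChars? is never none
def pyIntChar (c : Char) : Int := (PySem.Int.ofChars? [c]).getD 0

def pySign (x : Int) : Int := if x < 0 then -1 else if x > 0 then 1 else 0

-- the 'for c, c_n in zip(str_n, str_n[1:])' loop, with the break modelled by stopping the recursion
def meetCriteriaLoop : List (Char × Char) → Bool → Bool → Bool × Bool
  | [], adj, mono => (adj, mono)
  | (c, cn) :: rest, adj, mono =>
      if pySign (pyIntChar cn - pyIntChar c) = -1 then (adj, false)
      else meetCriteriaLoop rest (if c == cn then true else adj) mono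

def meetCriteria (n : Int) : Bool :=
  let str_n := PySem.Int.toChars n
  let r := meetCriteriaLoop (str_n.zip (PySem.List.slice str_n (some 1) none)) false true
  if r.1 && r.2 then true else false

-- ===== PORT B =====
def meetCriteria_alt (n : Int) : Bool :=
  let digits := (PySem.Int.toChars n).map pyIntChar
  decide (digits = PySem.List.sorted digits (fun x => x) false) &&
    decide (PySem.Set.len (PySem.Set.ofList digits) < PySem.List.len digits)

-- ===== PRECONDITION & SPEC =====
-- Pre_ excludes negative n, on which both A and B raise ValueError (int on the sign character of str(n))
def Pre_meetCriteria (n : Int) : Prop := 0 ≤ n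
instance (n : Int) : Decidable (Pre_meetCriteria n) := by unfold Pre_meetCriteria; infer_instance
def pvWitness_meetCriteria : Int := 122345

def Spec_meetCriteria (n : Int) (out : Bool) : Prop := out = meetCriteria_alt n
instance (n : Int) (out : Bool) : Decidable (Spec_meetCriteria n out) := by unfold Spec_meetCriteria; infer_instance

-- ===== CLAIM (what is proved, stated in full; the proofs are below) =====
def Claim_equal_meetCriteria : Prop := ∀ (n : Int), Dom_meetCriteria n → Pre_meetCriteria n → Spec_meetCriteria n (meetCriteria n)

-- ===== LEMMAS AND PROOFS =====

def pvDigitChars : List Char := ['0','1','2','3','4','5','6','7','8','9']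

theorem pvDigitChar_mem (k : Nat) (h : k < 10) : k.digitChar ∈ pvDigitChars := by
  interval_cases k <;> decide

theorem pvMem_toDigitsCore (f : Nat) : ∀ (m : Nat) (ds : List Char) (c : Char),
    c ∈ Nat.toDigitsCore 10 f m ds → c ∈ ds ∨ c ∈ pvDigitChars := by
  induction f with
  | zero => intro m ds c h; exact Or.inl h
  | succ f ih =>
    intro m ds c h
    simp only [Nat.toDigitsCore] at h
    by_cases h10 : m / 10 = 0
    · rw [if_pos h10] at h
      rcases List.mem_cons.mp h with h | h
      · exact Or.inr (h ▸ pvDigitChar_mem _ (Nat.mod_lt _ (by omega)))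
      · exact Or.inl h
    · rw [if_neg h10] at h
      rcases ih _ _ _ h with h | h
      · rcases List.mem_cons.mp h with h | h
        · exact Or.inr (h ▸ pvDigitChar_mem _ (Nat.mod_lt _ (by omega)))
        · exact Or.inl h
      · exact Or.inr h

theorem pvMem_toChars {n : Int} (hn : 0 ≤ n) {c : Char}
    (h : c ∈ PySem.Int.toChars n) : c ∈ pvDigitChars := by
  unfold PySem.Int.toChars at h
  rw [if_neg (by omega)] at h
  rcases pvMem_toDigitsCore _ _ _ _ h with h | h
  · simp at h
  · exact h

theorem pvIntChar_inj {a b : Char} (ha : a ∈ pvDigitChars) (hb : b ∈ pvDigitChars)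
    (h : pyIntChar a = pyIntChar b) : a = b := by
  fin_cases ha <;> fin_cases hb <;> revert h <;> decide

-- ∀-over-zip is exactly a chain condition
theorem pvZipForall_iff_isChain {α : Type} (R : α → α → Prop) :
    ∀ s : List α, (∀ p ∈ s.zip s.tail, R p.1 p.2) ↔ s.IsChain R := by
  intro s
  induction s with
  | nil => simp
  | cons a t ih =>
    cases t with
    | nil => simp
    | cons b u =>
      constructor
      · intro h
        refine List.IsChain.cons_cons (h (a, b) (by simp)) ?_
        exact ih.mp (fun p hp => h p (List.mem_cons_of_mem _ hp))
      · intro h p hp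
        rcases List.mem_cons.mp hp with h' | h'
        · subst h'; exact h.rel_head
        · exact ih.mpr h.tail p h'

-- second component of the loop result: whether the monotonicity break never fired
theorem pvLoop_snd (l : List (Char × Char)) (adj : Bool) :
    (meetCriteriaLoop l adj true).2 = true ↔ ∀ p ∈ l, pyIntChar p.1 ≤ pyIntChar p.2 := by
  induction l generalizing adj with
  | nil => simp [meetCriteriaLoop]
  | cons q rest ih =>
    obtain ⟨c, cn⟩ := q
    by_cases hle : pyIntChar c ≤ pyIntChar cn
    · have : ¬ pySign (pyIntChar cn - pyIntChar c) = -1 := by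
        intro heq; unfold pySign at heq; split_ifs at heq <;> omega
      simp only [meetCriteriaLoop, if_neg this]
      rw [ih]
      constructor
      · intro h p hp
        rcases List.mem_cons.mp hp with h' | h'
        · subst h'; exact hle
        · exact h p h'
      · intro h p hp; exact h p (List.mem_cons_of_mem _ hp)
    · have : pySign (pyIntChar cn - pyIntChar c) = -1 := by
        unfold pySign; rw [if_pos (by omega)]
      simp only [meetCriteriaLoop, if_pos this]
      constructor
      · intro h; simp at h
      · intro h; exact absurd (h (c, cn) (by simp)) hle

-- first component of the loop result when the break never fires
theorem pvLoop_fst (l : List (Char × Char)) (adj : Bool)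
    (h : ∀ p ∈ l, pyIntChar p.1 ≤ pyIntChar p.2) :
    (meetCriteriaLoop l adj true).1 = (adj || l.any (fun p => p.1 == p.2)) := by
  induction l generalizing adj with
  | nil => simp [meetCriteriaLoop]
  | cons q rest ih =>
    obtain ⟨c, cn⟩ := q
    have hle : pyIntChar c ≤ pyIntChar cn := h (c, cn) (by simp)
    have hs : ¬ pySign (pyIntChar cn - pyIntChar c) = -1 := by
      intro heq; unfold pySign at heq; split_ifs at heq <;> omega
    simp only [meetCriteriaLoop, if_neg hs]
    rw [ih _ (fun p hp => h p (List.mem_cons_of_mem _ hp))]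
    by_cases hcc : c = cn
    · subst hcc; simp
    · have : (c == cn) = false := by simpa using hcc
      simp [this]

-- B's first clause: list equal to its sort ↔ already non-decreasing
theorem pvSorted_self_iff (d : List Int) :
    d = PySem.List.sorted d (fun x => x) false ↔ d.Pairwise (· ≤ ·) := by
  constructor
  · intro h
    have := PySem.List.sorted_pairwise d (fun x => x)
    rw [← h] at this
    exact this
  · intro h
    exact (PySem.List.sorted_eq_self_of_pairwise d (fun x => x) h).symm

-- B's second clause: set(xs) smaller than xs ↔ xs has a duplicate
theorem pvOfList_length_lt_iff {α : Type} [DecidableEq α] (xs : List α) :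
    (PySem.Set.ofList xs).length < xs.length ↔ ¬ xs.Nodup := by
  constructor
  · intro h hnd
    rw [PySem.Set.ofList_eq_self_of_nodup xs hnd] at h
    omega
  · intro hnd
    rcases Nat.lt_or_ge (PySem.Set.ofList xs).length xs.length with h | h
    · exact h
    · exfalso
      have hsub : List.Subperm (PySem.Set.ofList xs) xs :=
        (PySem.Set.nodup_ofList xs).subperm (fun x hx => (PySem.Set.mem_ofList xs x).mp hx)
      have hperm : (PySem.Set.ofList xs).Perm xs := hsub.perm_of_length_le h
      exact hnd (hperm.nodup (PySem.Set.nodup_ofList xs))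

-- under monotonicity, a char-level adjacent duplicate is exactly a value-level duplicate
theorem pvDup_iff {s : List Char} (hd : ∀ c ∈ s, c ∈ pvDigitChars)
    (hmono : ∀ p ∈ s.zip s.tail, pyIntChar p.1 ≤ pyIntChar p.2) :
    ((s.zip s.tail).any (fun p => p.1 == p.2) = true) ↔ ¬ (s.map pyIntChar).Nodup := by
  constructor
  · intro h hnd
    rcases List.any_eq_true.mp h with ⟨p, hp, hpe⟩
    have hchain : s.IsChain (· ≠ ·) := by
      have h1 : (s.map pyIntChar).IsChain (· ≠ ·) := hnd.isChain
      exact ((List.isChain_map pyIntChar).mp h1).imp_of_mem_imp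
        (fun a _ b _ hne heq => hne (by rw [heq]))
    exact (pvZipForall_iff_isChain (· ≠ ·) s).mpr hchain p hp (by simpa using hpe)
  · intro hnd
    by_contra h
    apply hnd
    have hzip : ∀ p ∈ s.zip s.tail, pyIntChar p.1 < pyIntChar p.2 := by
      intro p hp
      obtain ⟨x, y⟩ := p
      obtain ⟨hx, hy⟩ := List.of_mem_zip hp
      have hxy : x ≠ y := fun heq => h (List.any_eq_true.mpr ⟨(x, y), hp, by simpa using heq⟩)
      have hle := hmono (x, y) hp
      have hne : pyIntChar x ≠ pyIntChar y :=
        fun he => hxy (pvIntChar_inj (hd x hx) (hd y (List.mem_of_mem_tail hy)) he)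
      simp only at hle hne ⊢
      omega
    have hlt : (s.map pyIntChar).IsChain (· < ·) :=
      (List.isChain_map pyIntChar).mpr ((pvZipForall_iff_isChain _ s).mp hzip)
    exact ((List.isChain_iff_pairwise).mp hlt).imp (fun h => ne_of_lt h)

-- ===== VERDICT (by name: the statement is the Claim_ definition above) =====
theorem meetCriteria_spec : Claim_equal_meetCriteria := by
  intro n _ hpre
  unfold Spec_meetCriteria
  simp only [meetCriteria, meetCriteria_alt, PySem.List.slice_from_one]
  have hd : ∀ c ∈ PySem.Int.toChars n, c ∈ pvDigitChars := fun c hc => pvMem_toChars hpre hc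
  set s := PySem.Int.toChars n with hs
  by_cases hmono : ∀ p ∈ s.zip s.tail, pyIntChar p.1 ≤ pyIntChar p.2
  · have h2 := (pvLoop_snd (s.zip s.tail) false).mpr hmono
    have h1 := pvLoop_fst (s.zip s.tail) false hmono
    have hmonoP : (s.map pyIntChar).Pairwise (· ≤ ·) :=
      (List.isChain_iff_pairwise).mp
        ((List.isChain_map pyIntChar).mpr ((pvZipForall_iff_isChain _ s).mp hmono))
    have hsorted : decide (s.map pyIntChar = PySem.List.sorted (s.map pyIntChar) (fun x => x) false) = true := by
      rw [decide_eq_true_eq]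
      exact (pvSorted_self_iff _).mpr hmonoP
    have hdup := pvDup_iff hd hmono
    have hlen : decide (PySem.Set.len (PySem.Set.ofList (s.map pyIntChar)) < PySem.List.len (s.map pyIntChar))
        = (s.zip s.tail).any (fun p => p.1 == p.2) := by
      cases ha : (s.zip s.tail).any (fun p => p.1 == p.2) with
      | false =>
        have hnd : (s.map pyIntChar).Nodup := by
          by_contra hnd
          have := hdup.mpr hnd
          rw [ha] at this
          exact Bool.false_ne_true this
        simp only [PySem.Set.len, PySem.List.len_eq, Nat.cast_lt, decide_eq_false_iff_not]
        exact fun hlt => ((pvOfList_length_lt_iff _).mp hlt) hnd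
      | true =>
        have hnd : ¬ (s.map pyIntChar).Nodup := hdup.mp ha
        simp only [PySem.Set.len, PySem.List.len_eq, Nat.cast_lt, decide_eq_true_eq]
        exact (pvOfList_length_lt_iff _).mpr hnd
    rw [h1, h2, hsorted, hlen]
    simp only [Bool.false_or, Bool.and_true, Bool.true_and]
    cases (s.zip s.tail).any (fun p => p.1 == p.2) <;> rfl
  · have h2 : ¬ ((meetCriteriaLoop (s.zip s.tail) false true).2 = true) :=
      fun h => hmono ((pvLoop_snd _ false).mp h)
    rw [Bool.not_eq_true] at h2
    have hns : decide (s.map pyIntChar = PySem.List.sorted (s.map pyIntChar) (fun x => x) false) = false := by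
      rw [decide_eq_false_iff_not]
      intro heq
      exact hmono ((pvZipForall_iff_isChain _ s).mpr
        ((List.isChain_map pyIntChar).mp
          (((pvSorted_self_iff _).mp heq).isChain)))
    simp [h2, hns]
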